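-- pv_equiv track=rewrite | github.com/ScherbakovAV/Python_GB2 | HW2/Ex3.py | numbers_reduction
-- ===== SOURCE A (Python) =====
-- def numbers_reduction(num1, num2):
--     end = 1
--     start = min(num1, num2)
--
--     while start != end:
--         if num1 % start == 0 and num2 % start == 0:
--             num1 = int(num1 / start)
--             num2 = int(num2 / start)
--             break
--         start -= 1
--
--     return [int(num1), int(num2)]
-- ===== SOURCE B (Python) =====
-- def numbers_reduction(num1, num2):
--     a, b = num1, num2
--     while b:
--         a, b = b, a % b
--     if a:
--         return [num1 // a, num2 // a]
--     return [num1, num2]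
-- ===== Notes on version B (the rewrite author's own statement) =====
-- stated objective: faster
-- what changed: Replaces A's downward linear scan from min(num1,num2) for the greatest common divisor with the Euclidean algorithm, then one exact division of each number.
-- outside the precondition, e.g. on numbers_reduction(-2, 4): A returns [1, -2], B returns [-1, 2]; on numbers_reduction(-1, 5): A returns [1, -5], B returns [-1, 5]; on numbers_reduction(0, 5): A raises ZeroDivisionError, B returns [0, 1]
-- crash fix: On inputs with both arguments nonnegative and at least one zero, A raises ZeroDivisionError (its scan starts at min = 0); B returns the pair reduced by gcd, e.g. [0, 1] for (0, 5) and [0, 0] for (0, 0). — e.g. on numbers_reduction(0, 5): A raises ZeroDivisionError, B returns [0, 1]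
import Mathlib
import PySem

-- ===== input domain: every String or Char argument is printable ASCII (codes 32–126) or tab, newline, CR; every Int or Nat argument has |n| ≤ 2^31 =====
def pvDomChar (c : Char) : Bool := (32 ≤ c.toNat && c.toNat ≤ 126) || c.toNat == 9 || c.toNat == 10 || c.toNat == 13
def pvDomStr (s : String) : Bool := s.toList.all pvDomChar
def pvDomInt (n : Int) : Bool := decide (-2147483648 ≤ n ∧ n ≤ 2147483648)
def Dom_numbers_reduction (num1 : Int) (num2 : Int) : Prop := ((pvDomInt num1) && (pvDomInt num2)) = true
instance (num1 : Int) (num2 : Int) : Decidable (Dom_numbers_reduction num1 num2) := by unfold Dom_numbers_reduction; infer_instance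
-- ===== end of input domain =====

-- B replaces A's downward linear scan for the greatest common divisor by the Euclidean
-- algorithm followed by one exact division of each number (asymptotically faster).


-- ===== PORT A =====
-- A's while-loop: scan 'start' downward from min(num1, num2); break and divide on the
-- first common divisor.  Branch order follows Python: exit test 'start != 1' first, then
-- the divisibility test.  The third branch only makes the recursion total: it is never
-- reached inside Pre_ (there Python raises ZeroDivisionError on start = 0 or loops
-- forever on start < 0).  'int(num1 / start)' is PySem.Int.truncdiv (exact for |n| ≤ 2^53).
def pvLoopA (num1 : Int) (num2 : Int) (start : Int) : List Int :=
  if start = 1 then [num1, num2]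
  else if PySem.Int.mod num1 start = 0 ∧ PySem.Int.mod num2 start = 0 then
    [PySem.Int.truncdiv num1 start, PySem.Int.truncdiv num2 start]
  else if start ≤ 1 then [num1, num2]
  else pvLoopA num1 num2 (start - 1)
termination_by start.toNat
decreasing_by omega

def numbers_reduction (num1 : Int) (num2 : Int) : List Int :=
  pvLoopA num1 num2 (min num1 num2)

-- ===== PORT B =====
-- Source B's Euclidean loop 'while b: a, b = b, a % b'.
def pvEuclid (a : Int) (b : Int) : Int :=
  if hb : b = 0 then a else pvEuclid b (PySem.Int.mod a b)
termination_by b.natAbs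
decreasing_by
  rcases lt_trichotomy b 0 with h | h | h
  · have := PySem.Int.mod_neg_bounds (a := a) h; omega
  · exact absurd h hb
  · have h1 := PySem.Int.mod_nonneg (a := a) h
    have h2 := PySem.Int.mod_lt (a := a) h
    omega

def numbers_reduction_alt (num1 : Int) (num2 : Int) : List Int :=
  let g := pvEuclid num1 num2
  if g ≠ 0 then [PySem.Int.floordiv num1 g, PySem.Int.floordiv num2 g]
  else [num1, num2]

-- ===== PRECONDITION & SPEC =====
-- Pre_ admits the positive inputs plus the degenerate non-positive corners on which A
-- still returns a value B matches (two equal negatives; a zero beside a negative); the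
-- remaining non-positive inputs are excluded: there A raises ZeroDivisionError (minimum
-- zero), loops forever (most negative minima), or breaks on a NEGATIVE common divisor
-- (e.g. a negative dividing a positive) — a corner where dividing by a negative or a
-- positive common divisor are both defensible conventions no caller would specify.
def Pre_numbers_reduction (num1 : Int) (num2 : Int) : Prop :=
  (1 ≤ num1 ∧ 1 ≤ num2) ∨ (num1 < 0 ∧ (num2 = num1 ∨ num2 = 0)) ∨ (num1 = 0 ∧ num2 < 0)
instance (num1 : Int) (num2 : Int) : Decidable (Pre_numbers_reduction num1 num2) := by
  unfold Pre_numbers_reduction; infer_instance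
def pvWitness_numbers_reduction : Int × Int := (12, 18)

-- On inputs with both arguments nonnegative and at least one of them zero, A raises
-- ZeroDivisionError (its scan starts at min = 0); B returns the pair reduced by gcd.
def Raises_numbers_reduction (num1 : Int) (num2 : Int) : Prop :=
  0 ≤ num1 ∧ 0 ≤ num2 ∧ (num1 = 0 ∨ num2 = 0)
instance (num1 : Int) (num2 : Int) : Decidable (Raises_numbers_reduction num1 num2) := by
  unfold Raises_numbers_reduction; infer_instance
def pvRaiseWitness_numbers_reduction : Int × Int := (0, 5)
def pvRaiseWitnessOut_numbers_reduction : List Int := [0, 1]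

def Spec_numbers_reduction (num1 : Int) (num2 : Int) (out : List Int) : Prop :=
  out = numbers_reduction_alt num1 num2
instance (num1 : Int) (num2 : Int) (out : List Int) : Decidable (Spec_numbers_reduction num1 num2 out) := by
  unfold Spec_numbers_reduction; infer_instance

-- ===== CLAIM (what is proved, stated in full; the proofs are below) =====
def Claim_equal_numbers_reduction : Prop := ∀ (num1 : Int) (num2 : Int), Dom_numbers_reduction num1 num2 → Pre_numbers_reduction num1 num2 → Spec_numbers_reduction num1 num2 (numbers_reduction num1 num2)
def Claim_raises_numbers_reduction : Prop := (∀ (num1 : Int) (num2 : Int), Dom_numbers_reduction num1 num2 → Raises_numbers_reduction num1 num2 → ¬ Pre_numbers_reduction num1 num2) ∧ (Dom_numbers_reduction (pvRaiseWitness_numbers_reduction.1) (pvRaiseWitness_numbers_reduction.2) ∧ Raises_numbers_reduction (pvRaiseWitness_numbers_reduction.1) (pvRaiseWitness_numbers_reduction.2) ∧ numbers_reduction_alt (pvRaiseWitness_numbers_reduction.1) (pvRaiseWitness_numbers_reduction.2) = pvRaiseWitnessOut_numbers_reduction)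

-- ===== LEMMAS AND PROOFS =====

-- truncating division agrees with floor division on an exact positive division
lemma pv_truncdiv_eq_floordiv (a b : Int) (h : 0 < b) (hd : b ∣ a) :
    PySem.Int.truncdiv a b = PySem.Int.floordiv a b := by
  rw [PySem.Int.floordiv_eq_ediv_of_pos h]
  simpa [PySem.Int.truncdiv] using Int.tdiv_eq_ediv_of_dvd hd

lemma pv_mod_self (n : Int) : PySem.Int.mod n n = 0 :=
  (PySem.Int.mod_eq_zero_iff_dvd n n).mpr dvd_rfl

lemma pv_mod_zero_left (n : Int) : PySem.Int.mod 0 n = 0 :=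
  (PySem.Int.mod_eq_zero_iff_dvd 0 n).mpr (dvd_zero n)

lemma pv_floordiv_self (n : Int) (h : n ≠ 0) : PySem.Int.floordiv n n = 1 := by
  have h1 := PySem.Int.floordiv_mul_add_mod n n
  have h2 := pv_mod_self n
  have h3 : PySem.Int.floordiv n n * n = 1 * n := by omega
  exact mul_right_cancel₀ h h3

lemma pv_floordiv_zero_left (n : Int) : PySem.Int.floordiv 0 n = 0 := by
  by_cases h : n = 0
  · subst h; simp [PySem.Int.floordiv]
  · have h1 := PySem.Int.floordiv_mul_add_mod 0 n
    have h2 := pv_mod_zero_left n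
    have h3 : PySem.Int.floordiv 0 n * n = 0 * n := by omega
    exact mul_right_cancel₀ h h3

-- the Euclidean loop computes the (nonnegative) gcd on nonnegative inputs
lemma pvEuclid_eq_gcd (a b : Int) (ha : 0 ≤ a) (hb : 0 ≤ b) :
    pvEuclid a b = (Int.gcd a b : Int) := by
  rw [pvEuclid]
  split
  · next h =>
    subst h
    simp [Int.gcd_def, Int.natAbs_of_nonneg ha]
  · next h =>
    have hbpos : 0 < b := lt_of_le_of_ne hb (Ne.symm h)
    rw [PySem.Int.mod_eq_emod_of_pos hbpos,
        pvEuclid_eq_gcd b (a % b) hb (Int.emod_nonneg a h)]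
    congr 1
    rw [Int.gcd_def, Int.gcd_def, Int.natAbs_emod_of_nonneg ha b,
        Nat.gcd_comm b.natAbs, ← Nat.gcd_rec, Nat.gcd_comm]
termination_by b.natAbs
decreasing_by
  have h1 := PySem.Int.mod_nonneg (a := a) hbpos
  have h2 := PySem.Int.mod_lt (a := a) hbpos
  rw [PySem.Int.mod_eq_emod_of_pos hbpos] at h1 h2
  omega

-- scanning downward from any point ≥ gcd, A's loop stops exactly at the gcd
lemma pvLoopA_eq (num1 num2 : Int) (h1 : 1 ≤ num1) (h2 : 1 ≤ num2) (start : Int)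
    (hg : (Int.gcd num1 num2 : Int) ≤ start) :
    pvLoopA num1 num2 start =
      [PySem.Int.floordiv num1 (Int.gcd num1 num2),
       PySem.Int.floordiv num2 (Int.gcd num1 num2)] := by
  have hgpos : 0 < (Int.gcd num1 num2 : Int) := by
    have : Int.gcd num1 num2 ≠ 0 := by
      simp [Int.gcd_eq_zero_iff]
      omega
    positivity
  rw [pvLoopA]
  split
  · next hle =>
    have hone : (Int.gcd num1 num2 : Int) = 1 := by omega
    rw [hone]
    simp
  · next hne1 =>
    split
    · next hcond =>
      have hd1 : start ∣ num1 := (PySem.Int.mod_eq_zero_iff_dvd num1 start).mp hcond.1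
      have hd2 : start ∣ num2 := (PySem.Int.mod_eq_zero_iff_dvd num2 start).mp hcond.2
      have hdg : start ∣ (Int.gcd num1 num2 : Int) := Int.dvd_coe_gcd hd1 hd2
      have hle : start ≤ (Int.gcd num1 num2 : Int) := Int.le_of_dvd hgpos hdg
      have heq : start = (Int.gcd num1 num2 : Int) := le_antisymm hle hg
      rw [pv_truncdiv_eq_floordiv num1 start (by omega) hd1,
          pv_truncdiv_eq_floordiv num2 start (by omega) hd2, heq]
    · next hcond =>
      have hne : (Int.gcd num1 num2 : Int) ≠ start := by
        intro he
        apply hcond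
        constructor
        · exact (PySem.Int.mod_eq_zero_iff_dvd num1 start).mpr (he ▸ Int.gcd_dvd_left num1 num2)
        · exact (PySem.Int.mod_eq_zero_iff_dvd num2 start).mpr (he ▸ Int.gcd_dvd_right num1 num2)
      rw [if_neg (by omega)]
      exact pvLoopA_eq num1 num2 h1 h2 (start - 1) (by omega)
termination_by start.toNat
decreasing_by omega

-- ===== VERDICT (by name: the statement is the Claim_ definition above) =====
theorem numbers_reduction_spec : Claim_equal_numbers_reduction := by
  intro num1 num2 _ hpre
  unfold Spec_numbers_reduction numbers_reduction numbers_reduction_alt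
  rcases hpre with ⟨h1, h2⟩ | ⟨h1, h21 | h20⟩ | ⟨h10, h2⟩
  · -- both positive: A's scan stops at the gcd, B's Euclid computes the gcd
    have hgpos : 0 < (Int.gcd num1 num2 : Int) := by
      have : Int.gcd num1 num2 ≠ 0 := by
        simp [Int.gcd_eq_zero_iff]
        omega
      positivity
    have hge : pvEuclid num1 num2 = (Int.gcd num1 num2 : Int) :=
      pvEuclid_eq_gcd num1 num2 (by omega) (by omega)
    have hle1 : (Int.gcd num1 num2 : Int) ≤ num1 :=
      Int.le_of_dvd (by omega) (Int.gcd_dvd_left num1 num2)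
    have hle2 : (Int.gcd num1 num2 : Int) ≤ num2 :=
      Int.le_of_dvd (by omega) (Int.gcd_dvd_right num1 num2)
    rw [pvLoopA_eq num1 num2 h1 h2 (min num1 num2) (by omega)]
    simp only [hge]
    rw [if_pos (by omega)]
  · -- num2 = num1 < 0: A breaks at start = num1 immediately, B's gcd is num1 itself
    replace h21 := h21.symm
    subst h21
    have hne : num1 ≠ 0 := by omega
    rw [min_self, pvLoopA, if_neg (by omega), if_pos ⟨pv_mod_self num1, pv_mod_self num1⟩,
        pvEuclid, dif_neg hne, pv_mod_self num1, pvEuclid, dif_pos rfl]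
    simp only [PySem.Int.truncdiv, Int.tdiv_self hne, if_pos hne, pv_floordiv_self num1 hne]
  · -- num2 = 0, num1 < 0: A breaks at start = num1, B's Euclid returns num1
    subst h20
    have hne : num1 ≠ 0 := by omega
    rw [min_eq_left (by omega : num1 ≤ (0:Int)), pvLoopA, if_neg (by omega),
        if_pos ⟨pv_mod_self num1, pv_mod_zero_left num1⟩, pvEuclid, dif_pos rfl]
    simp only [PySem.Int.truncdiv, Int.tdiv_self hne, Int.zero_tdiv, if_pos hne,
      pv_floordiv_self num1 hne, pv_floordiv_zero_left num1]
  · -- num1 = 0, num2 < 0: A breaks at start = num2, B's Euclid returns num2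
    subst h10
    have hne : num2 ≠ 0 := by omega
    rw [min_eq_right (by omega : num2 ≤ (0:Int)), pvLoopA, if_neg (by omega),
        if_pos ⟨pv_mod_zero_left num2, pv_mod_self num2⟩, pvEuclid, dif_neg hne,
        pv_mod_zero_left num2, pvEuclid, dif_pos rfl]
    simp only [PySem.Int.truncdiv, Int.tdiv_self hne, Int.zero_tdiv, if_pos hne,
      pv_floordiv_self num2 hne, pv_floordiv_zero_left num2]

theorem numbers_reduction_raises : Claim_raises_numbers_reduction := by
  unfold Claim_raises_numbers_reduction
  refine ⟨?_, by decide, by decide, ?_⟩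
  · intro num1 num2 _ hr hp
    unfold Raises_numbers_reduction at hr
    unfold Pre_numbers_reduction at hp
    omega
  · -- evaluate B's port at (0, 5) via its equation lemmas (well-founded recursion)
    show numbers_reduction_alt 0 5 = [0, 1]
    unfold numbers_reduction_alt
    rw [pvEuclid, pvEuclid, pvEuclid]
    norm_num [PySem.Int.mod, PySem.Int.floordiv]

-- witness self-check: B's port really returns the stated value at the raise witness
theorem numbers_reduction_raises_witness_ok :
    numbers_reduction_alt pvRaiseWitness_numbers_reduction.1 pvRaiseWitness_numbers_reduction.2 =
      pvRaiseWitnessOut_numbers_reduction :=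
  numbers_reduction_raises.2.2.2
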